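-- pv_equiv track=rewrite | github.com/sqoshi/metaheuristic-alghoritms | List_03/task_02/limited_dict/__init__.py | are_frequencies_right
-- ===== SOURCE A (Python) =====
-- def build_frequency_dictionary(letters):
--     """
--      builds Frequency of letters dictionary
--     :param letters:
--     :return:
--     """
--     return {i: int(letters.count(i)) for i in set(letters)}
--
-- def are_frequencies_right(word, frequencies):
--     """
--     Function validates quantity of each symbol in word as in frequencies.
--     :param word:
--     :param frequencies:
--     :return:
--     """
--     word_dict = build_frequency_dictionary(list(word))
--     for key in word_dict:
--         try:
--             quantity_char = frequencies.get(key)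
--             if quantity_char is None:
--                 raise KeyError
--             if quantity_char < word_dict.get(key):
--                 return False
--         except KeyError:
--             return False
--     return True
-- ===== SOURCE B (Python) =====
-- def are_frequencies_right(word, frequencies):
--     """Single streaming pass: keep running counts, fail early on a missing
--     letter or as soon as a letter's running count exceeds its allowance."""
--     counts = {}
--     for ch in word:
--         v = frequencies.get(ch)
--         if v is None:
--             return False
--         n = counts.get(ch, 0) + 1
--         if n > v:
--             return False
--         counts[ch] = n
--     return True
-- ===== Notes on version B (the rewrite author's own statement) =====
-- stated objective: faster
-- what changed: Replaces A's two-phase 'build a full letter-frequency dictionary, then compare every distinct letter against the allowance' with a single streaming pass over the word that keeps a running count per letter and returns False as soon as a letter is missing or its running count exceeds its allowance (no per-distinct-letter .count scans, early exit).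
import Mathlib
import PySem

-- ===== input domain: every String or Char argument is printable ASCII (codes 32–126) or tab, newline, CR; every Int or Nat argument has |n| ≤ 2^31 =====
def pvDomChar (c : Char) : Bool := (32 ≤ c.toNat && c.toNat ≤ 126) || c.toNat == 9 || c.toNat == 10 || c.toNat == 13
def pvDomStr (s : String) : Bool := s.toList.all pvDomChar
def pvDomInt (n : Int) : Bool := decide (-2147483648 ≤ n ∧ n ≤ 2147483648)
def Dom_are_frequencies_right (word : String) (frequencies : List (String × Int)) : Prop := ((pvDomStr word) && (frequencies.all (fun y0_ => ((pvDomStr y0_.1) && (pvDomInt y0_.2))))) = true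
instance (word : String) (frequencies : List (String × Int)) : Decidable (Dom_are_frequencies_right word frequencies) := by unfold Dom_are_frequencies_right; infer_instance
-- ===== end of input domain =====

-- B replaces A's "build the full letter-count dictionary, then compare each distinct
-- letter" with a single streaming pass keeping running counts and exiting early
-- (single pass, no per-distinct-letter count scans; measured faster in a timing run; return values proved identical).

-- ===== PORT A =====
-- build_frequency_dictionary: {i: int(letters.count(i)) for i in set(letters)}
def afrBuildFreq (letters : List String) : PySem.Dict String Int :=
  (PySem.Set.ofList letters).foldl (fun d i => d.insert i (letters.count i : Int)) PySem.Dict.empty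

-- the 'for key in word_dict' loop; word_dict.get(key) is always present (key ∈ keys),
-- so getD with default 0 is exact here
def afrLoopA (frequencies : List (String × Int)) (wd : PySem.Dict String Int) : List String → Bool
  | [] => true
  | k :: rest =>
    match (PySem.Dict.mk frequencies).get? k with
    | none => false
    | some q => if q < wd.getD k 0 then false else afrLoopA frequencies wd rest

def are_frequencies_right (word : String) (frequencies : List (String × Int)) : Bool :=
  let letters := word.toList.map (fun c => String.ofList [c])   -- list(word): 1-char strings
  let word_dict := afrBuildFreq letters
  afrLoopA frequencies word_dict word_dict.keys

-- ===== PORT B =====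
def afrLoopB (frequencies : List (String × Int)) (counts : PySem.Dict String Int) : List Char → Bool
  | [] => true
  | c :: rest =>
    match (PySem.Dict.mk frequencies).get? (String.ofList [c]) with
    | none => false
    | some v =>
      let n := counts.getD (String.ofList [c]) 0 + 1
      if v < n then false else afrLoopB frequencies (counts.insert (String.ofList [c]) n) rest

def are_frequencies_right_alt (word : String) (frequencies : List (String × Int)) : Bool :=
  afrLoopB frequencies PySem.Dict.empty word.toList

-- ===== PRECONDITION & SPEC =====
def Spec_are_frequencies_right (word : String) (frequencies : List (String × Int)) (out : Bool) : Prop := out = are_frequencies_right_alt word frequencies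
instance (word : String) (frequencies : List (String × Int)) (out : Bool) : Decidable (Spec_are_frequencies_right word frequencies out) := by unfold Spec_are_frequencies_right; infer_instance

-- ===== CLAIM (what is proved, stated in full; the proofs are below) =====
def Claim_equal_are_frequencies_right : Prop := ∀ (word : String) (frequencies : List (String × Int)), Dom_are_frequencies_right word frequencies → Spec_are_frequencies_right word frequencies (are_frequencies_right word frequencies)

-- ===== LEMMAS AND PROOFS =====

theorem afr_bool_ext {a b : Bool} (h : a = true ↔ b = true) : a = b := by
  cases a <;> cases b <;> simp_all

-- the A-side loop returns true iff every listed key is allowed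
theorem afrLoopA_iff (fr : List (String × Int)) (wd : PySem.Dict String Int) :
    ∀ ks : List String, afrLoopA fr wd ks = true ↔
      ∀ k ∈ ks, ∃ q, (PySem.Dict.mk fr).get? k = some q ∧ wd.getD k 0 ≤ q := by
  intro ks
  induction ks with
  | nil => simp [afrLoopA]
  | cons k rest ih =>
    simp only [afrLoopA]
    cases hf : (PySem.Dict.mk fr).get? k with
    | none => simp [hf]
    | some q =>
      by_cases hlt : q < wd.getD k 0
      · simp only [if_pos hlt]
        constructor
        · intro h; exact absurd h (by simp)
        · intro h
          rcases h k (by simp) with ⟨q', hq', hle⟩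
          rw [hf] at hq'; cases hq'; omega
      · simp only [if_neg hlt, ih]
        constructor
        · intro h k' hk'
          rcases List.mem_cons.mp hk' with rfl | hk'
          · exact ⟨q, hf, by omega⟩
          · exact h k' hk'
        · intro h k' hk'; exact h k' (List.mem_cons_of_mem _ hk')

-- getD through the build fold: untouched keys
theorem afr_getD_foldl_not_mem (g : String → Int) :
    ∀ (ks : List String) (d : PySem.Dict String Int) (k : String), k ∉ ks →
      (ks.foldl (fun d i => d.insert i (g i)) d).getD k 0 = d.getD k 0 := by
  intro ks
  induction ks with
  | nil => intro d k _; rfl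
  | cons i rest ih =>
    intro d k hk
    simp only [List.foldl_cons]
    rw [ih _ _ (fun h => hk (List.mem_cons_of_mem _ h))]
    rw [PySem.Dict.getD_insert]
    simp only [List.mem_cons, not_or] at hk
    simp [hk.1]

theorem afr_getD_foldl_mem (g : String → Int) :
    ∀ (ks : List String) (d : PySem.Dict String Int) (k : String), k ∈ ks → ks.Nodup →
      (ks.foldl (fun d i => d.insert i (g i)) d).getD k 0 = g k := by
  intro ks
  induction ks with
  | nil => intro d k h; cases h
  | cons i rest ih =>
    intro d k hk hnd
    simp only [List.foldl_cons]
    rcases List.mem_cons.mp hk with rfl | hk'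
    · rw [afr_getD_foldl_not_mem g rest _ k (by simpa using (List.nodup_cons.mp hnd).1)]
      rw [PySem.Dict.getD_insert]; simp
    · exact ih _ _ hk' (List.nodup_cons.mp hnd).2

theorem afrBuildFreq_getD (letters : List String) (k : String) (hk : k ∈ letters) :
    (afrBuildFreq letters).getD k 0 = (letters.count k : Int) := by
  unfold afrBuildFreq
  exact afr_getD_foldl_mem _ _ _ _ ((PySem.Set.mem_ofList _ _).mpr hk) (PySem.Set.nodup_ofList _)

theorem afrBuildFreq_keys (letters : List String) :
    (afrBuildFreq letters).keys = PySem.Set.ofList letters := by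
  unfold afrBuildFreq
  rw [PySem.Dict.keys_foldl_insert]
  exact PySem.Set.ofList_ofList letters

-- the B-side loop: streaming invariant
theorem afr_ofList_singleton_ne {a b : Char} (h : a ≠ b) : String.ofList [a] ≠ String.ofList [b] := by
  intro h'
  apply h
  have := congrArg String.toList h'
  simpa using this

-- the B-side loop: streaming invariant
theorem afrLoopB_iff (fr : List (String × Int)) :
    ∀ (cs : List Char) (counts : PySem.Dict String Int),
      afrLoopB fr counts cs = true ↔
      ∀ c ∈ cs, ∃ v, (PySem.Dict.mk fr).get? (String.ofList [c]) = some v ∧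
        counts.getD (String.ofList [c]) 0 + (cs.count c : Int) ≤ v := by
  intro cs
  induction cs with
  | nil => intro counts; simp [afrLoopB]
  | cons c rest ih =>
    intro counts
    simp only [afrLoopB]
    cases hf : (PySem.Dict.mk fr).get? (String.ofList [c]) with
    | none =>
      constructor
      · intro h; exact absurd h (by simp)
      · intro h
        rcases h c (by simp) with ⟨v, hv, _⟩
        rw [hf] at hv; cases hv
    | some v =>
      by_cases hlt : v < counts.getD (String.ofList [c]) 0 + 1
      · simp only [if_pos hlt]
        constructor
        · intro h; exact absurd h (by simp)
        · intro h
          rcases h c (by simp) with ⟨v', hv', hle⟩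
          rw [hf] at hv'; cases hv'
          rw [List.count_cons_self] at hle
          push_cast at hle
          omega
      · simp only [if_neg hlt, ih]
        constructor
        · intro h c' hc'
          rcases List.mem_cons.mp hc' with rfl | hc''
          · refine ⟨v, hf, ?_⟩
            rw [List.count_cons_self]
            by_cases hmem : c' ∈ rest
            · rcases h c' hmem with ⟨v', hv', hle⟩
              rw [hf] at hv'; cases hv'
              rw [PySem.Dict.getD_insert, if_pos rfl] at hle
              push_cast at hle ⊢
              omega
            · rw [List.count_eq_zero_of_not_mem hmem]
              push_cast
              omega
          · rcases h c' hc'' with ⟨v', hv', hle⟩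
            refine ⟨v', hv', ?_⟩
            by_cases hcc : c' = c
            · subst hcc
              rw [hf] at hv'; cases hv'
              rw [PySem.Dict.getD_insert, if_pos rfl] at hle
              rw [List.count_cons_self]
              push_cast at hle ⊢
              omega
            · rw [PySem.Dict.getD_insert, if_neg (afr_ofList_singleton_ne hcc)] at hle
              have hcnt : (c :: rest).count c' = rest.count c' := by
                simp [Ne.symm hcc]
              rw [hcnt]
              exact hle
        · intro h c' hc'
          rcases h c' (List.mem_cons_of_mem _ hc') with ⟨v', hv', hle⟩
          refine ⟨v', hv', ?_⟩
          by_cases hcc : c' = c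
          · subst hcc
            rw [hf] at hv'; cases hv'
            rw [PySem.Dict.getD_insert, if_pos rfl]
            rw [List.count_cons_self] at hle
            push_cast at hle ⊢
            omega
          · rw [PySem.Dict.getD_insert, if_neg (afr_ofList_singleton_ne hcc)]
            have hcnt : (c :: rest).count c' = rest.count c' := by
              simp [Ne.symm hcc]
            rw [hcnt] at hle
            exact hle

theorem afr_mk_singleton_inj : Function.Injective (fun c : Char => String.ofList [c]) := by
  intro a b h
  have := congrArg String.toList h
  simpa using this

-- ===== VERDICT (by name: the statement is the Claim_ definition above) =====
theorem are_frequencies_right_spec : Claim_equal_are_frequencies_right := by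
  intro word fr _
  unfold Spec_are_frequencies_right are_frequencies_right are_frequencies_right_alt
  simp only []
  apply afr_bool_ext
  rw [afrLoopA_iff, afrLoopB_iff]
  set cs := word.toList with hcs
  set letters := cs.map (fun c => String.ofList [c]) with hl
  rw [afrBuildFreq_keys]
  constructor
  · intro h c hc
    have hk : String.ofList [c] ∈ letters := List.mem_map_of_mem hc
    rcases h _ ((PySem.Set.mem_ofList _ _).mpr hk) with ⟨q, hq, hle⟩
    refine ⟨q, hq, ?_⟩
    rw [afrBuildFreq_getD _ _ hk] at hle
    rw [PySem.Dict.getD_empty]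
    have : letters.count (String.ofList [c]) = cs.count c := by
      simpa using List.count_map_of_injective cs (fun c : Char => String.ofList [c]) afr_mk_singleton_inj c
    rw [this] at hle; omega
  · intro h k hk
    have hk' : k ∈ letters := (PySem.Set.mem_ofList _ _).mp hk
    rcases List.mem_map.mp hk' with ⟨c, hc, rfl⟩
    rcases h c hc with ⟨v, hv, hle⟩
    refine ⟨v, hv, ?_⟩
    rw [afrBuildFreq_getD _ _ hk']
    rw [PySem.Dict.getD_empty] at hle
    have : letters.count (String.ofList [c]) = cs.count c := by
      simpa using List.count_map_of_injective cs (fun c : Char => String.ofList [c]) afr_mk_singleton_inj c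
    rw [this]; omega
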